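-- pv_equiv track=rewrite | github.com/KNU-Dynamic-Men/Study-Algorithm | baekjoon/10주차/자물쇠와-열쇠/정우/n03.py | solution
-- ===== SOURCE A (Python) =====
-- def rotate_key(key):
--     ret = [[0]*len(key) for _ in range(len(key))]
--     for i in range(len(key)):
--         for j in range(len(key)):
--             ret[j][len(key)-i-1] = key[i][j]
--     return ret
--
-- def try_to_match_key_into_lock(key, lock, zeros, x, y):
--     correct_cnt = 0
--     for i in range(x, x+len(key)):
--         for j in range(y, y+len(key)):
--             if lock[i][j]==1 and key[i-x][j-y]==1:
--                 return False
--             if lock[i][j] == 0 and key[i-x][j-y] == 1: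
--                 correct_cnt += 1
--     if correct_cnt == zeros:
--         return True
--     else:
--         return False
--
-- def solution(key, lock):
--     zeros = 0
--     big_lock = [[2]*len(lock)*3 for _ in range(len(lock)*3)]
--     for i in range(len(lock), len(lock)*2):
--         for j in range(len(lock), len(lock)*2):
--             big_lock[i][j] = lock[i-(len(lock))][j-(len(lock))]
--             if big_lock[i][j] == 0:
--                 zeros += 1
--
--     for _ in range(4):
--         for i in range(len(lock)-len(key)+1, len(lock)*2):
--             for j in range(len(lock)-len(key)+1, len(lock)*2):
--                 if try_to_match_key_into_lock(key, big_lock, zeros, i, j):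
--                     return True
--         key = rotate_key(key)
--     return False
-- ===== SOURCE B (Python) =====
-- def solution(key, lock):
--     n, m = len(lock), len(key)
--     kk = key
--     for _ in range(4):
--         for x in range(n - m + 1, 2 * n):
--             for y in range(n - m + 1, 2 * n):
--                 if fits(kk, lock, n, m, x, y):
--                     return True
--         kk = [[kk[m - 1 - i][j] for i in range(m)] for j in range(m)]
--     return False
--
-- def covered_val(kk, n, m, x, y, r, c):
--     i, j = r + n, c + n
--     if x <= i < x + m and y <= j < y + m:
--         return kk[i - x][j - y]
--     return None
--
-- def fits(kk, lock, n, m, x, y):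
--     for r in range(n):
--         for c in range(n):
--             v = lock[r][c]
--             k = covered_val(kk, n, m, x, y, r, c)
--             if v == 0 and k != 1:
--                 return False
--             if v == 1 and k == 1:
--                 return False
--     return True
-- ===== Notes on version B (the rewrite author's own statement) =====
-- stated objective: alternative
-- what changed: B drops A's 3Nx3N padded board and zero-count bookkeeping entirely: for each rotation and the same placement offsets it validates the placement by one direct pass over the lock's own NxN cells, requiring every 0-cell to be covered by a key 1 and no 1-cell to be, with rotation done by a comprehension instead of A's preallocate-and-assign.
-- outside the precondition, e.g. on solution([[4, -3], [8, 5], [4, 10, 0], [164, 10], [-2]], [[5, -1]]): A returns True, B raises IndexError; on solution([[0, 0, 0], [0, 0, 0], [0, 0, 0]], [[1]]): A returns True, B returns True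
import Mathlib
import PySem

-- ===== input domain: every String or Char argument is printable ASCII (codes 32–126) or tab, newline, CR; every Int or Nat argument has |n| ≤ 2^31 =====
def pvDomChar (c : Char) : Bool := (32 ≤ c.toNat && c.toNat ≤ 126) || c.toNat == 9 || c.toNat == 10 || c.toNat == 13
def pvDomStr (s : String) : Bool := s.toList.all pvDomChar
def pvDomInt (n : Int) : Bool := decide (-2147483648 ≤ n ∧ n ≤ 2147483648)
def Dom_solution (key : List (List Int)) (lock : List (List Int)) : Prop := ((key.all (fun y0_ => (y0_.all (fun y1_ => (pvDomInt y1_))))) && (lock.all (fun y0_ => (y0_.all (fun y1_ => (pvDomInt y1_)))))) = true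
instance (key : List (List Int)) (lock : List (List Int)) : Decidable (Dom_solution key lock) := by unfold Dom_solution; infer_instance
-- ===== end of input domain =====

-- One honest line: B replaces A's padded 3N×3N board + matched-zero counting by a direct
-- per-placement check over the lock's own N×N cells; alternative structure, no speed claim.

-- shared 2-D indexing helper: mat[i][j] with Python semantics (exact while indices are in range)
def pvCell (mat : List (List Int)) (i j : Int) : Int :=
  PySem.List.pyGetD (PySem.List.pyGetD mat i []) j 0

-- ===== PORT A =====

-- ret[j][len-i-1] = key[i][j] over two range(len(key)) loops into a zero matrix
def rotate_key (key : List (List Int)) : List (List Int) :=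
  let m := key.length
  (PySem.List.pyRange 0 (m : Int) 1).foldl (fun ret i =>
    (PySem.List.pyRange 0 (m : Int) 1).foldl (fun ret j =>
      PySem.List.pySetD ret j
        (PySem.List.pySetD (PySem.List.pyGetD ret j []) ((m : Int) - i - 1) (pvCell key i j))) ret)
    (List.replicate m (List.replicate m (0 : Int)))

-- inner 'for j' of try_to_match_key_into_lock: none = early 'return False'
def tryInner (key bl : List (List Int)) (x y i : Int) : List Int → Int → Option Int
  | [], c => some c
  | j :: js, c =>
    if pvCell bl i j = 1 ∧ pvCell key (i - x) (j - y) = 1 then none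
    else tryInner key bl x y i js
      (if pvCell bl i j = 0 ∧ pvCell key (i - x) (j - y) = 1 then c + 1 else c)

-- outer 'for i' of try_to_match_key_into_lock
def tryOuter (key bl : List (List Int)) (x y : Int) : List Int → Int → Option Int
  | [], c => some c
  | i :: is, c =>
    match tryInner key bl x y i (PySem.List.pyRange y (y + (key.length : Int)) 1) c with
    | none => none
    | some c' => tryOuter key bl x y is c'

def try_to_match_key_into_lock (key bl : List (List Int)) (zeros x y : Int) : Bool :=
  match tryOuter key bl x y (PySem.List.pyRange x (x + (key.length : Int)) 1) 0 with
  | none => false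
  | some c => c == zeros

-- the first double loop of solution: builds big_lock and counts zeros
def buildBig (lock : List (List Int)) : List (List Int) × Int :=
  let n := lock.length
  (PySem.List.pyRange (n : Int) (2 * n : Int) 1).foldl (fun st i =>
    (PySem.List.pyRange (n : Int) (2 * n : Int) 1).foldl (fun st j =>
      let bl := PySem.List.pySetD st.1 i
        (PySem.List.pySetD (PySem.List.pyGetD st.1 i []) j (pvCell lock (i - n) (j - n)))
      (bl, if pvCell bl i j = 0 then st.2 + 1 else st.2)) st) 
    (List.replicate (3 * n) (List.replicate (3 * n) (2 : Int)), (0 : Int))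

-- 'for _ in range(4)' with early 'return True'
def rotLoop (lock bl : List (List Int)) (zeros : Int) : Nat → List (List Int) → Bool
  | 0, _ => false
  | t + 1, key =>
    if (PySem.List.pyRange ((lock.length : Int) - key.length + 1) (2 * lock.length : Int) 1).any
         (fun i => (PySem.List.pyRange ((lock.length : Int) - key.length + 1) (2 * lock.length : Int) 1).any
           (fun j => try_to_match_key_into_lock key bl zeros i j))
    then true
    else rotLoop lock bl zeros t (rotate_key key)

def solution (key : List (List Int)) (lock : List (List Int)) : Bool :=
  let st := buildBig lock
  rotLoop lock st.1 st.2 4 key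

-- ===== PORT B =====

-- covered_val of Source B: the key cell covering lock cell (r,c), if the placement covers it
def bCov (kk : List (List Int)) (n m : Nat) (x y : Int) (r c : Nat) : Option Int :=
  if x ≤ (r : Int) + n ∧ (r : Int) + n < x + m ∧ y ≤ (c : Int) + n ∧ (c : Int) + n < y + m
  then some (pvCell kk ((r : Int) + n - x) ((c : Int) + n - y)) else none

-- fits of Source B: direct pass over the lock's own n×n cells
def fitsB (kk lock : List (List Int)) (n m : Nat) (x y : Int) : Bool :=
  (List.range n).all (fun (r : Nat) => (List.range n).all (fun (c : Nat) =>
    let v := pvCell lock (r : Int) (c : Int)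
    let k := bCov kk n m x y r c
    if v = 0 ∧ k ≠ some 1 then false else if v = 1 ∧ k = some 1 then false else true))

-- rotation, by comprehension: row j = [kk[m-1-i][j] for i in range(m)]
def rotB (kk : List (List Int)) (m : Nat) : List (List Int) :=
  (List.range m).map (fun (j : Nat) =>
    (List.range m).map (fun (i : Nat) => pvCell kk ((m : Int) - 1 - i) (j : Int)))

def altLoop (lock : List (List Int)) (n m : Nat) : Nat → List (List Int) → Bool
  | 0, _ => false
  | t + 1, kk =>
    if (PySem.List.pyRange ((n : Int) - m + 1) (2 * n : Int) 1).any
         (fun x => (PySem.List.pyRange ((n : Int) - m + 1) (2 * n : Int) 1).any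
           (fun y => fitsB kk lock n m x y))
    then true
    else altLoop lock n m t (rotB kk m)

def solution_alt (key : List (List Int)) (lock : List (List Int)) : Bool :=
  altLoop lock lock.length key.length 4 key

-- ===== PRECONDITION & SPEC =====
-- Pre_ excludes inputs where A raises IndexError (a key/lock row shorter than the grid size,
-- or a key more than one wider than the lock, which also makes A's placement range negative so
-- that when A does return there it is via Python's negative-index wraparound — an accident).
def Pre_solution (key : List (List Int)) (lock : List (List Int)) : Prop :=
  (∀ row ∈ key, key.length ≤ row.length) ∧ (∀ row ∈ lock, lock.length ≤ row.length) ∧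
  key.length ≤ lock.length + 1

instance (key : List (List Int)) (lock : List (List Int)) : Decidable (Pre_solution key lock) := by
  unfold Pre_solution; infer_instance

def pvWitness_solution : List (List Int) × List (List Int) := ([[1]], [[0]])

def Spec_solution (key : List (List Int)) (lock : List (List Int)) (out : Bool) : Prop := out = solution_alt key lock
instance (key : List (List Int)) (lock : List (List Int)) (out : Bool) : Decidable (Spec_solution key lock out) := by unfold Spec_solution; infer_instance

-- ===== CLAIM (what is proved, stated in full; the proofs are below) =====
def Claim_equal_solution : Prop := ∀ (key : List (List Int)) (lock : List (List Int)), Dom_solution key lock → Pre_solution key lock → Spec_solution key lock (solution key lock)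

-- ===== LEMMAS AND PROOFS =====

-- ---------- generic machinery: cells, products, folds of sets ----------

theorem pvCell_natCast (mat : List (List Int)) (r c : Nat) :
    pvCell mat (r : Int) (c : Int) = (mat.getD r []).getD c 0 := by
  simp [pvCell]

-- product of two index lists, row-major (i outer)
def pvProd (is js : List Int) : List (Int × Int) :=
  is.flatMap (fun i => js.map (fun j => (i, j)))

theorem pvMem_prod (is js : List Int) (e : Int × Int) :
    e ∈ pvProd is js ↔ e.1 ∈ is ∧ e.2 ∈ js := by
  cases e with
  | mk a b =>
    simp only [pvProd, List.mem_flatMap, List.mem_map, Prod.mk.injEq]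
    constructor
    · rintro ⟨i, hi, j, hj, hij1, hij2⟩; exact ⟨hij1 ▸ hi, hij2 ▸ hj⟩
    · rintro ⟨ha, hb⟩; exact ⟨a, ha, b, hb, rfl, rfl⟩

theorem pvFoldl_nested {σ : Type} (f : σ → Int → Int → σ) (is js : List Int) (init : σ) :
    is.foldl (fun s i => js.foldl (fun s j => f s i j) s) init
      = (pvProd is js).foldl (fun s e => f s e.1 e.2) init := by
  induction is generalizing init with
  | nil => simp [pvProd]
  | cons i is ih =>
    simp only [pvProd, List.flatMap_cons, List.foldl_append, List.foldl_cons, List.foldl_map]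
    rw [ih]; rfl

theorem pvSum_prod (is js : List Int) (g : Int → Int → Int) :
    ((pvProd is js).map (fun e => g e.1 e.2)).sum
      = (is.map (fun i => (js.map (g i)).sum)).sum := by
  induction is with
  | nil => simp [pvProd]
  | cons i is ih =>
    simp only [pvProd, List.flatMap_cons, List.map_append, List.sum_append, List.map_cons,
      List.sum_cons, List.map_map]
    rw [← pvProd] at *
    simp only [ih]; rfl

-- one step of 'mat[p][q] ← v' in Python style
def pvSetCell (mat : List (List Int)) (p q : Int) (v : Int) : List (List Int) :=
  PySem.List.pySetD mat p (PySem.List.pySetD (PySem.List.pyGetD mat p []) q v)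

theorem pvSetCell_natCast (mat : List (List Int)) (pn qn : Nat) (v : Int) :
    pvSetCell mat (pn : Int) (qn : Int) v = mat.set pn ((mat.getD pn []).set qn v) := by
  simp [pvSetCell]

theorem pvRow_set (mat : List (List Int)) (pn rn : Nat) (row : List Int) :
    ((mat.set pn row).getD rn []) =
      if rn = pn ∧ pn < mat.length then row else mat.getD rn [] := by
  rcases eq_or_ne rn pn with rfl | hne
  · by_cases h : rn < mat.length
    · simp [List.getD_eq_getElem?_getD, List.getElem?_set_self h, h]
    · rw [if_neg (by omega), List.set_eq_of_length_le (by omega)]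
  · simp [List.getD_eq_getElem?_getD, List.getElem?_set_ne (Ne.symm hne), hne]

theorem pvRowLen_set (mat : List (List Int)) (pn qn rn : Nat) (v : Int) :
    (((mat.set pn ((mat.getD pn []).set qn v)).getD rn [])).length
      = ((mat.getD rn []).length) := by
  rw [pvRow_set]
  split_ifs with h
  · rw [h.1]; simp
  · rfl

theorem pvCell_setCell (mat : List (List Int)) (pn qn rn cn : Nat) (v : Int)
    (hp : pn < mat.length) (hq : qn < (mat.getD pn []).length) :
    pvCell (pvSetCell mat (pn : Int) (qn : Int) v) (rn : Int) (cn : Int)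
      = if rn = pn ∧ cn = qn then v else pvCell mat (rn : Int) (cn : Int) := by
  rw [pvSetCell_natCast, pvCell_natCast, pvCell_natCast, pvRow_set]
  rcases eq_or_ne rn pn with rfl | hne
  · rw [if_pos ⟨rfl, hp⟩]
    rcases eq_or_ne cn qn with rfl | hcne
    · rw [if_pos ⟨rfl, rfl⟩, List.getD_eq_getElem?_getD, List.getElem?_set_self hq,
        Option.getD_some]
    · rw [if_neg (by tauto), List.getD_eq_getElem?_getD, List.getElem?_set_ne (Ne.symm hcne),
        ← List.getD_eq_getElem?_getD]
  · simp [hne]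

-- characterization of a fold of cell-writes: dimensions preserved, written cells take w, others keep
theorem pv_foldl_set (p q : Int × Int → Int) (w : Int → Int → Int) (R C : Nat)
    (L : List (Int × Int)) :
    ∀ (mat : List (List Int)), mat.length = R →
      (∀ r : Nat, r < R → (mat.getD r []).length = C) →
      (∀ e ∈ L, 0 ≤ p e ∧ p e < (R : Int) ∧ 0 ≤ q e ∧ q e < (C : Int)) →
      ((L.foldl (fun m e => pvSetCell m (p e) (q e) (w (p e) (q e))) mat).length = R ∧
       (∀ r : Nat, r < R →
         ((L.foldl (fun m e => pvSetCell m (p e) (q e) (w (p e) (q e))) mat).getD r []).length = C) ∧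
       (∀ r c : Nat,
         pvCell (L.foldl (fun m e => pvSetCell m (p e) (q e) (w (p e) (q e))) mat) (r : Int) (c : Int)
           = if ∃ e ∈ L, p e = (r : Int) ∧ q e = (c : Int) then w r c
             else pvCell mat (r : Int) (c : Int))) := by
  induction L with
  | nil => intro mat h1 h2 _; simpa using ⟨h1, h2⟩
  | cons e L ih =>
    intro mat h1 h2 hr
    obtain ⟨hp0, hpR, hq0, hqC⟩ := hr e (List.mem_cons_self ..)
    obtain ⟨pn, hpn⟩ : ∃ pn : Nat, p e = (pn : Int) := ⟨(p e).toNat, (Int.toNat_of_nonneg hp0).symm⟩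
    obtain ⟨qn, hqn⟩ : ∃ qn : Nat, q e = (qn : Int) := ⟨(q e).toNat, (Int.toNat_of_nonneg hq0).symm⟩
    have hpnR : pn < R := by omega
    have hqnC : qn < C := by omega
    have hplen : pn < mat.length := by omega
    have hqlen : qn < (mat.getD pn []).length := by rw [h2 pn hpnR]; exact hqnC
    simp only [List.foldl_cons]
    set mat1 := pvSetCell mat (p e) (q e) (w (p e) (q e)) with hmat1
    have hml : mat1.length = R := by
      rw [hmat1, hpn, hqn, pvSetCell_natCast]; simpa using h1
    have hmr : ∀ r : Nat, r < R → ((mat1.getD r []).length) = C := by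
      intro r hrR
      rw [hmat1, hpn, hqn, pvSetCell_natCast, pvRowLen_set]
      exact h2 r hrR
    obtain ⟨c1, c2, c3⟩ := ih mat1 hml hmr (fun e' he' => hr e' (List.mem_cons_of_mem _ he'))
    refine ⟨c1, c2, ?_⟩
    intro r c
    rw [c3 r c]
    have hcell : pvCell mat1 (r : Int) (c : Int)
        = if r = pn ∧ c = qn then w (p e) (q e) else pvCell mat (r : Int) (c : Int) := by
      rw [hmat1, hpn, hqn]; exact pvCell_setCell mat pn qn r c _ hplen hqlen
    by_cases hL : ∃ e' ∈ L, p e' = (r : Int) ∧ q e' = (c : Int)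
    · rw [if_pos hL, if_pos (by obtain ⟨e', he', h'⟩ := hL; exact ⟨e', List.mem_cons_of_mem _ he', h'⟩)]
    · rw [if_neg hL, hcell]
      by_cases hrc : r = pn ∧ c = qn
      · rw [if_pos hrc, if_pos ⟨e, List.mem_cons_self .., by omega⟩]
        rw [hpn, hqn, hrc.1, hrc.2]
      · rw [if_neg hrc, if_neg ?_]
        rintro ⟨e', he', h1', h2'⟩
        rcases List.mem_cons.mp he' with rfl | hmem
        · exact hrc ⟨by omega, by omega⟩
        · exact hL ⟨e', hmem, h1', h2'⟩

-- the buildBig fold also threads the zero counter; split it off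
theorem pv_foldl_setz (p q : Int × Int → Int) (w : Int → Int → Int) (R C : Nat)
    (L : List (Int × Int)) :
    ∀ (mat : List (List Int)) (z : Int), mat.length = R →
      (∀ r : Nat, r < R → (mat.getD r []).length = C) →
      (∀ e ∈ L, 0 ≤ p e ∧ p e < (R : Int) ∧ 0 ≤ q e ∧ q e < (C : Int)) →
      (L.foldl (fun st e =>
          (pvSetCell st.1 (p e) (q e) (w (p e) (q e)),
           if pvCell (pvSetCell st.1 (p e) (q e) (w (p e) (q e))) (p e) (q e) = 0
           then st.2 + 1 else st.2)) (mat, z))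
        = (L.foldl (fun m e => pvSetCell m (p e) (q e) (w (p e) (q e))) mat,
           z + (L.map (fun e => if w (p e) (q e) = 0 then (1 : Int) else 0)).sum) := by
  induction L with
  | nil => intro mat z _ _ _; simp
  | cons e L ih =>
    intro mat z h1 h2 hr
    obtain ⟨hp0, hpR, hq0, hqC⟩ := hr e (List.mem_cons_self ..)
    obtain ⟨pn, hpn⟩ : ∃ pn : Nat, p e = (pn : Int) := ⟨(p e).toNat, (Int.toNat_of_nonneg hp0).symm⟩
    obtain ⟨qn, hqn⟩ : ∃ qn : Nat, q e = (qn : Int) := ⟨(q e).toNat, (Int.toNat_of_nonneg hq0).symm⟩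
    have hplen : pn < mat.length := by omega
    have hqlen : qn < (mat.getD pn []).length := by rw [h2 pn (by omega)]; omega
    have hcell : pvCell (pvSetCell mat (p e) (q e) (w (p e) (q e))) (p e) (q e)
        = w (p e) (q e) := by
      rw [hpn, hqn, pvCell_setCell mat pn qn pn qn _ hplen hqlen, if_pos ⟨rfl, rfl⟩]
    have hml : (pvSetCell mat (p e) (q e) (w (p e) (q e))).length = R := by
      rw [hpn, hqn, pvSetCell_natCast]; simpa using h1
    have hmr : ∀ r : Nat, r < R →
        (((pvSetCell mat (p e) (q e) (w (p e) (q e))).getD r []).length) = C := by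
      intro r hrR
      rw [hpn, hqn, pvSetCell_natCast, pvRowLen_set]
      exact h2 r hrR
    simp only [List.foldl_cons, hcell]
    rw [ih _ _ hml hmr (fun e' he' => hr e' (List.mem_cons_of_mem _ he'))]
    simp only [List.map_cons, List.sum_cons, Prod.mk.injEq]
    refine ⟨trivial, ?_⟩
    split_ifs <;> ring

-- what the padded board holds at (i, j), and the number of zeros in the lock
def bigCell (lock : List (List Int)) (i j : Int) : Int :=
  if (lock.length : Int) ≤ i ∧ i < 2 * lock.length ∧ (lock.length : Int) ≤ j ∧ j < 2 * lock.length
  then pvCell lock (i - lock.length) (j - lock.length) else 2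

def zerosVal (lock : List (List Int)) : Int :=
  ((List.range lock.length).map (fun (r : Nat) =>
    ((List.range lock.length).map (fun (c : Nat) =>
      if pvCell lock (r : Int) (c : Int) = 0 then (1 : Int) else 0)).sum)).sum

theorem buildBig_spec (lock : List (List Int)) :
    (buildBig lock).1.length = 3 * lock.length ∧
    (∀ r : Nat, r < 3 * lock.length → (((buildBig lock).1.getD r []).length) = 3 * lock.length) ∧
    (∀ r c : Nat, r < 3 * lock.length → c < 3 * lock.length →
      pvCell (buildBig lock).1 (r : Int) (c : Int) = bigCell lock (r : Int) (c : Int)) ∧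
    (buildBig lock).2 = zerosVal lock := by
  have hinit1 : (List.replicate (3 * lock.length) (List.replicate (3 * lock.length) (2 : Int))).length
      = 3 * lock.length := by simp
  have hinit2 : ∀ r : Nat, r < 3 * lock.length →
      (((List.replicate (3 * lock.length) (List.replicate (3 * lock.length) (2 : Int))).getD r []).length)
        = 3 * lock.length := by
    intro r hr; rw [List.getD_eq_getElem?_getD, List.getElem?_replicate, if_pos hr]; simp
  have hrange : ∀ e ∈ pvProd (PySem.List.pyRange (lock.length : Int) (2 * lock.length : Int) 1)
      (PySem.List.pyRange (lock.length : Int) (2 * lock.length : Int) 1),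
      0 ≤ e.1 ∧ e.1 < ((3 * lock.length : Nat) : Int) ∧ 0 ≤ e.2 ∧ e.2 < ((3 * lock.length : Nat) : Int) := by
    intro e he
    obtain ⟨h1, h2⟩ := (pvMem_prod _ _ e).mp he
    rw [PySem.List.mem_pyRange_one] at h1 h2
    push_cast
    omega
  have h0 : buildBig lock
      = (pvProd (PySem.List.pyRange (lock.length : Int) (2 * lock.length : Int) 1)
          (PySem.List.pyRange (lock.length : Int) (2 * lock.length : Int) 1)).foldl
          (fun st e =>
            (pvSetCell st.1 e.1 e.2 (pvCell lock (e.1 - lock.length) (e.2 - lock.length)),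
             if pvCell (pvSetCell st.1 e.1 e.2 (pvCell lock (e.1 - lock.length) (e.2 - lock.length))) e.1 e.2 = 0
             then st.2 + 1 else st.2))
          (List.replicate (3 * lock.length) (List.replicate (3 * lock.length) (2 : Int)), (0 : Int)) := by
    simp only [buildBig]
    exact pvFoldl_nested _ _ _ _
  have h1 := pv_foldl_setz (fun e => e.1) (fun e => e.2)
      (fun r c => pvCell lock (r - lock.length) (c - lock.length)) (3 * lock.length) (3 * lock.length)
      (pvProd (PySem.List.pyRange (lock.length : Int) (2 * lock.length : Int) 1)
        (PySem.List.pyRange (lock.length : Int) (2 * lock.length : Int) 1))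
      (List.replicate (3 * lock.length) (List.replicate (3 * lock.length) (2 : Int))) 0
      hinit1 hinit2 hrange
  rw [h1] at h0
  have h2 := pv_foldl_set (fun e => e.1) (fun e => e.2)
      (fun r c => pvCell lock (r - lock.length) (c - lock.length)) (3 * lock.length) (3 * lock.length)
      (pvProd (PySem.List.pyRange (lock.length : Int) (2 * lock.length : Int) 1)
        (PySem.List.pyRange (lock.length : Int) (2 * lock.length : Int) 1))
      (List.replicate (3 * lock.length) (List.replicate (3 * lock.length) (2 : Int)))
      hinit1 hinit2 hrange
  obtain ⟨d1, d2, d3⟩ := h2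
  refine ⟨by rw [h0]; exact d1, by rw [h0]; exact d2, ?_, ?_⟩
  · intro r c hr hc
    rw [h0]
    simp only []
    rw [d3 r c]
    by_cases hmem : ((lock.length : Int) ≤ (r : Int) ∧ (r : Int) < 2 * lock.length)
        ∧ ((lock.length : Int) ≤ (c : Int) ∧ (c : Int) < 2 * lock.length)
    · rw [if_pos ?side, bigCell, if_pos (by tauto)]
      case side =>
        refine ⟨((r : Int), (c : Int)), ?_, rfl, rfl⟩
        rw [pvMem_prod]
        exact ⟨PySem.List.mem_pyRange_one.mpr hmem.1, PySem.List.mem_pyRange_one.mpr hmem.2⟩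
    · rw [if_neg ?side2, bigCell, if_neg (by tauto)]
      · simp [pvCell_natCast, List.getD_eq_getElem?_getD, List.getElem?_replicate, hr, hc]
      case side2 =>
        rintro ⟨e, he, he1, he2⟩
        obtain ⟨m1, m2⟩ := (pvMem_prod _ _ e).mp he
        rw [PySem.List.mem_pyRange_one] at m1 m2
        simp only [] at he1 he2
        exact hmem ⟨by omega, by omega⟩
  · rw [h0]
    simp only []
    rw [pvSum_prod _ _ (fun i j =>
      if pvCell lock (i - (lock.length : Int)) (j - (lock.length : Int)) = 0 then (1 : Int) else 0)]
    rw [zero_add, PySem.List.pyRange_one,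
      show ((2 * (lock.length : Int)) - (lock.length : Int)).toNat = lock.length from by omega,
      List.map_map]
    unfold zerosVal
    refine congrArg List.sum (List.map_congr_left ?_)
    intro r _
    simp only [Function.comp_def]
    rw [List.map_map]
    refine congrArg List.sum (List.map_congr_left ?_)
    intro c _
    simp only [Function.comp_def]
    have e1 : ((lock.length : Int) + (r : Int)) - lock.length = (r : Int) := by omega
    have e2 : ((lock.length : Int) + (c : Int)) - lock.length = (c : Int) := by omega
    rw [e1, e2]

-- characterize A's inner counting loop with early exit
theorem tryInner_spec (key bl : List (List Int)) (x y i : Int) :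
    ∀ (js : List Int) (c : Int),
      tryInner key bl x y i js c =
        if ∃ j ∈ js, pvCell bl i j = 1 ∧ pvCell key (i - x) (j - y) = 1 then none
        else some (c + (js.map (fun j =>
          if pvCell bl i j = 0 ∧ pvCell key (i - x) (j - y) = 1 then (1 : Int) else 0)).sum) := by
  intro js
  induction js with
  | nil => intro c; simp [tryInner]
  | cons j js ih =>
    intro c
    by_cases h1 : pvCell bl i j = 1 ∧ pvCell key (i - x) (j - y) = 1
    · rw [tryInner, if_pos h1, if_pos ⟨j, List.mem_cons_self .., h1⟩]
    · rw [tryInner, if_neg h1, ih]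
      by_cases h2 : ∃ j' ∈ js, pvCell bl i j' = 1 ∧ pvCell key (i - x) (j' - y) = 1
      · rw [if_pos h2, if_pos ?_]
        obtain ⟨j', hj', hc'⟩ := h2
        exact ⟨j', List.mem_cons_of_mem _ hj', hc'⟩
      · have hne : ¬ ∃ j' ∈ j :: js, pvCell bl i j' = 1 ∧ pvCell key (i - x) (j' - y) = 1 := by
          rintro ⟨j', hj', hc'⟩
          rcases List.mem_cons.mp hj' with he | hmem
          · subst he; exact h1 hc'
          · exact h2 ⟨j', hmem, hc'⟩
        rw [if_neg h2, if_neg hne]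
        refine congrArg some ?_
        simp only [List.map_cons, List.sum_cons]
        by_cases hcnt : pvCell bl i j = 0 ∧ pvCell key (i - x) (j - y) = 1
        · simp only [if_pos hcnt]; omega
        · simp only [if_neg hcnt]; omega

-- characterize A's outer loop
theorem tryOuter_spec (key bl : List (List Int)) (x y : Int) :
    ∀ (is : List Int) (c : Int),
      tryOuter key bl x y is c =
        if ∃ i ∈ is, ∃ j ∈ PySem.List.pyRange y (y + (key.length : Int)) 1,
            pvCell bl i j = 1 ∧ pvCell key (i - x) (j - y) = 1 then none
        else some (c + (is.map (fun i =>
          ((PySem.List.pyRange y (y + (key.length : Int)) 1).map (fun j =>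
            if pvCell bl i j = 0 ∧ pvCell key (i - x) (j - y) = 1 then (1 : Int) else 0)).sum)).sum) := by
  intro is
  induction is with
  | nil => intro c; simp [tryOuter]
  | cons i is ih =>
    intro c
    rw [tryOuter, tryInner_spec]
    by_cases h1 : ∃ j ∈ PySem.List.pyRange y (y + (key.length : Int)) 1,
        pvCell bl i j = 1 ∧ pvCell key (i - x) (j - y) = 1
    · rw [if_pos h1, if_pos ⟨i, List.mem_cons_self .., h1⟩]
    · rw [if_neg h1]
      dsimp only
      rw [ih]
      by_cases h2 : ∃ i' ∈ is, ∃ j ∈ PySem.List.pyRange y (y + (key.length : Int)) 1,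
          pvCell bl i' j = 1 ∧ pvCell key (i' - x) (j - y) = 1
      · rw [if_pos h2, if_pos ?_]
        obtain ⟨i', hi', hc'⟩ := h2
        exact ⟨i', List.mem_cons_of_mem _ hi', hc'⟩
      · have hne : ¬ ∃ i' ∈ i :: is, ∃ j ∈ PySem.List.pyRange y (y + (key.length : Int)) 1,
            pvCell bl i' j = 1 ∧ pvCell key (i' - x) (j - y) = 1 := by
          rintro ⟨i', hi', hc'⟩
          rcases List.mem_cons.mp hi' with he | hmem
          · subst he; exact h1 hc'
          · exact h2 ⟨i', hmem, hc'⟩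
        rw [if_neg h2, if_neg hne]
        exact congrArg some (by simp only [List.map_cons, List.sum_cons]; omega)

theorem try_match_true_iff (key bl : List (List Int)) (zeros x y : Int) :
    try_to_match_key_into_lock key bl zeros x y = true ↔
      (¬ ∃ i ∈ PySem.List.pyRange x (x + (key.length : Int)) 1,
          ∃ j ∈ PySem.List.pyRange y (y + (key.length : Int)) 1,
            pvCell bl i j = 1 ∧ pvCell key (i - x) (j - y) = 1) ∧
      ((PySem.List.pyRange x (x + (key.length : Int)) 1).map (fun i =>
        ((PySem.List.pyRange y (y + (key.length : Int)) 1).map (fun j =>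
          if pvCell bl i j = 0 ∧ pvCell key (i - x) (j - y) = 1 then (1 : Int) else 0)).sum)).sum
        = zeros := by
  rw [try_to_match_key_into_lock, tryOuter_spec]
  by_cases h : ∃ i ∈ PySem.List.pyRange x (x + (key.length : Int)) 1,
      ∃ j ∈ PySem.List.pyRange y (y + (key.length : Int)) 1,
        pvCell bl i j = 1 ∧ pvCell key (i - x) (j - y) = 1
  · rw [if_pos h]
    dsimp only
    simp only [Bool.false_eq_true, false_iff, not_and]
    intro hn
    exact absurd h hn
  · rw [if_neg h]
    dsimp only
    rw [beq_iff_eq, zero_add]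
    exact ⟨fun h2 => ⟨h, h2⟩, fun h2 => h2.2⟩

-- the inner double-if of fits
theorem pvIte2 (P Q : Prop) [Decidable P] [Decidable Q] :
    ((if P then false else if Q then false else true) = true) ↔ (¬P ∧ ¬Q) := by
  split_ifs <;> simp_all

theorem fitsB_true_iff (kk lock : List (List Int)) (n m : Nat) (x y : Int) :
    fitsB kk lock n m x y = true ↔
      ∀ r : Nat, r < n → ∀ c : Nat, c < n →
        (¬(pvCell lock (r : Int) (c : Int) = 0 ∧ bCov kk n m x y r c ≠ some 1) ∧
         ¬(pvCell lock (r : Int) (c : Int) = 1 ∧ bCov kk n m x y r c = some 1)) := by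
  rw [fitsB]
  simp only [List.all_eq_true, List.mem_range]
  constructor
  · intro h r hr c hc
    exact (pvIte2 _ _).mp (h r hr c hc)
  · intro h r hr c hc
    exact (pvIte2 _ _).mpr (h r hr c hc)

-- extend an interval sum when the summand vanishes outside the inner interval
theorem pvSum_extend (f : Int → Int) (a b A B : Int) (hab : a ≤ b) (hA : A ≤ a) (hB : b ≤ B)
    (hz : ∀ i : Int, A ≤ i → i < B → ¬(a ≤ i ∧ i < b) → f i = 0) :
    ((PySem.List.pyRange a b 1).map f).sum = ((PySem.List.pyRange A B 1).map f).sum := by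
  rw [PySem.List.pyRange_one_append A a B hA (le_trans hab hB),
      PySem.List.pyRange_one_append a b B hab hB]
  simp only [List.map_append, List.sum_append]
  have s1 : ((PySem.List.pyRange A a 1).map f).sum = 0 := by
    apply List.sum_eq_zero
    intro v hv
    obtain ⟨i, hi, rfl⟩ := List.mem_map.mp hv
    rw [PySem.List.mem_pyRange_one] at hi
    exact hz i (by omega) (by omega) (by omega)
  have s2 : ((PySem.List.pyRange b B 1).map f).sum = 0 := by
    apply List.sum_eq_zero
    intro v hv
    obtain ⟨i, hi, rfl⟩ := List.mem_map.mp hv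
    rw [PySem.List.mem_pyRange_one] at hi
    exact hz i (by omega) (by omega) (by omega)
  rw [s1, s2]; ring

-- sums of pointwise-dominated summands agree iff the summands agree
theorem pvSum_eq_iff {α : Type} (l : List α) (f g : α → Int) (h : ∀ a ∈ l, f a ≤ g a) :
    ((l.map f).sum = (l.map g).sum) ↔ ∀ a ∈ l, f a = g a := by
  induction l with
  | nil => simp
  | cons a l ih =>
    have hsle : (l.map f).sum ≤ (l.map g).sum :=
      List.sum_le_sum (fun b hb => h b (List.mem_cons_of_mem _ hb))
    have hfa := h a (List.mem_cons_self ..)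
    simp only [List.map_cons, List.sum_cons]
    constructor
    · intro heq
      have h1 : f a = g a ∧ (l.map f).sum = (l.map g).sum := by omega
      intro b hb
      rcases List.mem_cons.mp hb with rfl | hmem
      · exact h1.1
      · exact ((ih (fun b hb => h b (List.mem_cons_of_mem _ hb))).mp h1.2) b hmem
    · intro hall
      rw [hall a (List.mem_cons_self ..),
        (ih (fun b hb => h b (List.mem_cons_of_mem _ hb))).mpr
          (fun b hb => hall b (List.mem_cons_of_mem _ hb))]

-- indicator of: center cell, covered by the placement footprint, lock zero there, key one there
def pvF (kk lock : List (List Int)) (x y i j : Int) : Int :=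
  if ((lock.length : Int) ≤ i ∧ i < 2 * lock.length ∧ (lock.length : Int) ≤ j ∧ j < 2 * lock.length)
     ∧ (x ≤ i ∧ i < x + kk.length ∧ y ≤ j ∧ j < y + kk.length)
     ∧ pvCell lock (i - lock.length) (j - lock.length) = 0
     ∧ pvCell kk (i - x) (j - y) = 1
  then 1 else 0

-- indicator of: center cell, lock zero there
def pvG (lock : List (List Int)) (i j : Int) : Int :=
  if ((lock.length : Int) ≤ i ∧ i < 2 * lock.length ∧ (lock.length : Int) ≤ j ∧ j < 2 * lock.length)
     ∧ pvCell lock (i - lock.length) (j - lock.length) = 0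
  then 1 else 0

-- common index interval covering both the footprint and the center
def pvU (n m : Nat) : List Int := PySem.List.pyRange ((n : Int) - m) (2 * n + m) 1

theorem pvF_le_G (kk lock : List (List Int)) (x y i j : Int) :
    pvF kk lock x y i j ≤ pvG lock i j := by
  rw [pvF, pvG]
  split_ifs with h1 h2 <;> first | omega | exact absurd ⟨h1.1, h1.2.2.1⟩ h2

-- A's per-placement count, rewritten as a sum of pvF over the common interval
theorem pvSumF (kk lock : List (List Int)) (x y : Int) (hm : kk.length ≤ lock.length + 1)
    (hx1 : (lock.length : Int) - kk.length + 1 ≤ x) (hx2 : x < 2 * lock.length)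
    (hy1 : (lock.length : Int) - kk.length + 1 ≤ y) (hy2 : y < 2 * lock.length) :
    ((PySem.List.pyRange x (x + (kk.length : Int)) 1).map (fun i =>
      ((PySem.List.pyRange y (y + (kk.length : Int)) 1).map (fun j =>
        if pvCell (buildBig lock).1 i j = 0 ∧ pvCell kk (i - x) (j - y) = 1 then (1 : Int) else 0)).sum)).sum
    = ((pvU lock.length kk.length).map (fun i =>
        ((pvU lock.length kk.length).map (fun j => pvF kk lock x y i j)).sum)).sum := by
  obtain ⟨hb1, hb2, hbcell, hbz⟩ := buildBig_spec lock
  have hcong : ∀ i ∈ PySem.List.pyRange x (x + (kk.length : Int)) 1,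
      ((PySem.List.pyRange y (y + (kk.length : Int)) 1).map (fun j =>
        if pvCell (buildBig lock).1 i j = 0 ∧ pvCell kk (i - x) (j - y) = 1 then (1 : Int) else 0)).sum
      = ((pvU lock.length kk.length).map (fun j => pvF kk lock x y i j)).sum := by
    intro i hi
    rw [PySem.List.mem_pyRange_one] at hi
    have hstep : ∀ j ∈ PySem.List.pyRange y (y + (kk.length : Int)) 1,
        (if pvCell (buildBig lock).1 i j = 0 ∧ pvCell kk (i - x) (j - y) = 1 then (1 : Int) else 0)
        = pvF kk lock x y i j := by
      intro j hj
      rw [PySem.List.mem_pyRange_one] at hj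
      obtain ⟨iN, rfl⟩ : ∃ iN : Nat, i = (iN : Int) := ⟨i.toNat, by omega⟩
      obtain ⟨jN, rfl⟩ : ∃ jN : Nat, j = (jN : Int) := ⟨j.toNat, by omega⟩
      rw [hbcell iN jN (by omega) (by omega), bigCell, pvF]
      by_cases hctr : ((lock.length : Int) ≤ (iN : Int) ∧ (iN : Int) < 2 * lock.length
          ∧ (lock.length : Int) ≤ (jN : Int) ∧ (jN : Int) < 2 * lock.length)
      · rw [if_pos hctr]
        by_cases hz : pvCell lock ((iN : Int) - lock.length) ((jN : Int) - lock.length) = 0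
            ∧ pvCell kk ((iN : Int) - x) ((jN : Int) - y) = 1
        · rw [if_pos hz, if_pos ⟨hctr, ⟨by omega, by omega, by omega, by omega⟩, hz.1, hz.2⟩]
        · rw [if_neg hz, if_neg (by tauto)]
      · have h20 : ¬((2 : Int) = 0 ∧ pvCell kk ((iN : Int) - x) ((jN : Int) - y) = 1) := by
          rintro ⟨h2, -⟩; omega
        rw [if_neg hctr, if_neg h20, if_neg (fun h => absurd h.1 hctr)]
    rw [List.map_congr_left hstep]
    exact pvSum_extend (fun j => pvF kk lock x y i j) y (y + kk.length)
      ((lock.length : Int) - kk.length) (2 * lock.length + kk.length)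
      (by omega) (by omega) (by omega)
      (fun j _ _ hout => by simp only [pvF]; rw [if_neg (by tauto)])
  rw [List.map_congr_left hcong]
  exact pvSum_extend (fun i => ((pvU lock.length kk.length).map (fun j => pvF kk lock x y i j)).sum)
    x (x + kk.length) ((lock.length : Int) - kk.length) (2 * lock.length + kk.length)
    (by omega) (by omega) (by omega)
    (fun i _ _ hout => List.sum_eq_zero (fun v hv => by
      obtain ⟨j, hj, rfl⟩ := List.mem_map.mp hv
      simp only [pvF]; rw [if_neg (by tauto)]))

-- the zero count, rewritten as a sum of pvG over the common interval
theorem pvSumG (kk lock : List (List Int)) :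
    zerosVal lock
    = ((pvU lock.length kk.length).map (fun i =>
        ((pvU lock.length kk.length).map (fun j => pvG lock i j)).sum)).sum := by
  have hinner : ∀ i ∈ PySem.List.pyRange (lock.length : Int) (2 * lock.length) 1,
      ((pvU lock.length kk.length).map (fun j => pvG lock i j)).sum
      = ((PySem.List.pyRange (lock.length : Int) (2 * lock.length) 1).map (fun j => pvG lock i j)).sum := by
    intro i hi
    rw [PySem.List.mem_pyRange_one] at hi
    exact (pvSum_extend (fun j => pvG lock i j) (lock.length : Int) (2 * lock.length)
      ((lock.length : Int) - kk.length) (2 * lock.length + kk.length)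
      (by omega) (by omega) (by omega)
      (fun j _ _ hout => by simp only [pvG]; rw [if_neg (by tauto)])).symm
  have houter : ((pvU lock.length kk.length).map (fun i =>
        ((pvU lock.length kk.length).map (fun j => pvG lock i j)).sum)).sum
      = ((PySem.List.pyRange (lock.length : Int) (2 * lock.length) 1).map (fun i =>
          ((pvU lock.length kk.length).map (fun j => pvG lock i j)).sum)).sum :=
    (pvSum_extend (fun i => ((pvU lock.length kk.length).map (fun j => pvG lock i j)).sum)
      (lock.length : Int) (2 * lock.length)
      ((lock.length : Int) - kk.length) (2 * lock.length + kk.length)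
      (by omega) (by omega) (by omega)
      (fun i _ _ hout => List.sum_eq_zero (fun v hv => by
        obtain ⟨j, hj, rfl⟩ := List.mem_map.mp hv
        simp only [pvG]; rw [if_neg (by tauto)]))).symm
  have houter2 : ((PySem.List.pyRange (lock.length : Int) (2 * lock.length) 1).map (fun i =>
        ((pvU lock.length kk.length).map (fun j => pvG lock i j)).sum)).sum
      = ((PySem.List.pyRange (lock.length : Int) (2 * lock.length) 1).map (fun i =>
          ((PySem.List.pyRange (lock.length : Int) (2 * lock.length) 1).map (fun j => pvG lock i j)).sum)).sum :=
    congrArg List.sum (List.map_congr_left hinner)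
  have hcc : ((PySem.List.pyRange (lock.length : Int) (2 * lock.length) 1).map (fun i =>
        ((PySem.List.pyRange (lock.length : Int) (2 * lock.length) 1).map (fun j => pvG lock i j)).sum)).sum
      = zerosVal lock := by
    rw [PySem.List.pyRange_one,
      show ((2 * (lock.length : Int)) - (lock.length : Int)).toNat = lock.length from by omega,
      List.map_map, zerosVal]
    refine congrArg List.sum (List.map_congr_left ?_)
    intro r hr
    rw [List.mem_range] at hr
    simp only [Function.comp_def]
    rw [List.map_map]
    refine congrArg List.sum (List.map_congr_left ?_)
    intro c hc
    rw [List.mem_range] at hc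
    simp only [Function.comp_def, pvG]
    have e1 : ((lock.length : Int) + (r : Int)) - lock.length = (r : Int) := by omega
    have e2 : ((lock.length : Int) + (c : Int)) - lock.length = (c : Int) := by omega
    rw [e1, e2]
    by_cases hz : pvCell lock (r : Int) (c : Int) = 0
    · rw [if_pos ⟨⟨by omega, by omega, by omega, by omega⟩, hz⟩, if_pos hz]
    · rw [if_neg (by tauto), if_neg hz]
  exact (hcc.symm.trans houter2.symm).trans houter.symm

theorem pvBCov_some1 (kk : List (List Int)) (n m : Nat) (x y : Int) (r c : Nat) :
    bCov kk n m x y r c = some 1 ↔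
      ((x ≤ (r : Int) + n ∧ (r : Int) + n < x + m ∧ y ≤ (c : Int) + n ∧ (c : Int) + n < y + m) ∧
       pvCell kk ((r : Int) + n - x) ((c : Int) + n - y) = 1) := by
  rw [bCov]
  split_ifs with h <;> simp [h]

-- the heart: A's conflict-free + zero-count test equals B's direct center check
theorem match_iff_fits (kk lock : List (List Int)) (x y : Int)
    (hm : kk.length ≤ lock.length + 1)
    (hx1 : (lock.length : Int) - kk.length + 1 ≤ x) (hx2 : x < 2 * lock.length)
    (hy1 : (lock.length : Int) - kk.length + 1 ≤ y) (hy2 : y < 2 * lock.length) :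
    try_to_match_key_into_lock kk (buildBig lock).1 (buildBig lock).2 x y
      = fitsB kk lock lock.length kk.length x y := by
  obtain ⟨hb1, hb2, hbcell, hbz⟩ := buildBig_spec lock
  rw [Bool.eq_iff_iff, try_match_true_iff, fitsB_true_iff, hbz,
    pvSumF kk lock x y hm hx1 hx2 hy1 hy2, pvSumG kk lock,
    pvSum_eq_iff _ _ _ (fun i _ => List.sum_le_sum (fun j _ => pvF_le_G kk lock x y i j))]
  have hinner_iff : (∀ i ∈ pvU lock.length kk.length,
      ((pvU lock.length kk.length).map (fun j => pvF kk lock x y i j)).sum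
        = ((pvU lock.length kk.length).map (fun j => pvG lock i j)).sum) ↔
      (∀ i ∈ pvU lock.length kk.length, ∀ j ∈ pvU lock.length kk.length,
        pvF kk lock x y i j = pvG lock i j) :=
    forall₂_congr (fun i _ => pvSum_eq_iff _ _ _ (fun j _ => pvF_le_G kk lock x y i j))
  rw [hinner_iff]
  constructor
  · rintro ⟨hnc, hFG⟩ r hr c hc
    have hiU : ((r : Int) + lock.length) ∈ pvU lock.length kk.length := by
      rw [pvU, PySem.List.mem_pyRange_one]; omega
    have hjU : ((c : Int) + lock.length) ∈ pvU lock.length kk.length := by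
      rw [pvU, PySem.List.mem_pyRange_one]; omega
    have h := hFG _ hiU _ hjU
    simp only [pvF, pvG] at h
    have e1 : ((r : Int) + lock.length) - lock.length = (r : Int) := by omega
    have e2 : ((c : Int) + lock.length) - lock.length = (c : Int) := by omega
    rw [e1, e2] at h
    constructor
    · rintro ⟨hz, hk⟩
      have hGpos : (((lock.length : Int) ≤ (r : Int) + lock.length
            ∧ (r : Int) + lock.length < 2 * lock.length
            ∧ (lock.length : Int) ≤ (c : Int) + lock.length
            ∧ (c : Int) + lock.length < 2 * lock.length))
          ∧ pvCell lock (r : Int) (c : Int) = 0 :=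
        ⟨⟨by omega, by omega, by omega, by omega⟩, hz⟩
      rw [if_pos hGpos] at h
      by_cases hcF : ((lock.length : Int) ≤ (r : Int) + lock.length
            ∧ (r : Int) + lock.length < 2 * lock.length
            ∧ (lock.length : Int) ≤ (c : Int) + lock.length
            ∧ (c : Int) + lock.length < 2 * lock.length)
          ∧ (x ≤ (r : Int) + lock.length ∧ (r : Int) + lock.length < x + kk.length
            ∧ y ≤ (c : Int) + lock.length ∧ (c : Int) + lock.length < y + kk.length)
          ∧ pvCell lock (r : Int) (c : Int) = 0
          ∧ pvCell kk (((r : Int) + lock.length) - x) (((c : Int) + lock.length) - y) = 1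
      · exact hk ((pvBCov_some1 kk lock.length kk.length x y r c).mpr
          ⟨⟨by omega, by omega, by omega, by omega⟩, hcF.2.2.2⟩)
      · rw [if_neg hcF] at h
        omega
    · rintro ⟨h1, hk⟩
      obtain ⟨hfoot, hK⟩ := (pvBCov_some1 kk lock.length kk.length x y r c).mp hk
      apply hnc
      refine ⟨(r : Int) + lock.length, ?_, (c : Int) + lock.length, ?_, ?_, ?_⟩
      · rw [PySem.List.mem_pyRange_one]; omega
      · rw [PySem.List.mem_pyRange_one]; omega
      · have := hbcell (lock.length + r) (lock.length + c) (by omega) (by omega)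
        rw [show (((lock.length + r : Nat)) : Int) = (r : Int) + lock.length from by push_cast; ring,
            show (((lock.length + c : Nat)) : Int) = (c : Int) + lock.length from by push_cast; ring] at this
        rw [this, bigCell, if_pos ⟨by omega, by omega, by omega, by omega⟩, e1, e2]
        exact h1
      · exact hK
  · intro hB
    have hUmem : ∀ t : Int, (lock.length : Int) ≤ t → t < 2 * lock.length →
        ((t - lock.length).toNat : Int) = t - lock.length := by
      intro t h1 h2; omega
    constructor
    · rintro ⟨i, hi, j, hj, h1, hK⟩
      rw [PySem.List.mem_pyRange_one] at hi hj
      obtain ⟨iN, rfl⟩ : ∃ iN : Nat, i = (iN : Int) := ⟨i.toNat, by omega⟩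
      obtain ⟨jN, rfl⟩ : ∃ jN : Nat, j = (jN : Int) := ⟨j.toNat, by omega⟩
      rw [hbcell iN jN (by omega) (by omega), bigCell] at h1
      by_cases hctr : ((lock.length : Int) ≤ (iN : Int) ∧ (iN : Int) < 2 * lock.length
          ∧ (lock.length : Int) ≤ (jN : Int) ∧ (jN : Int) < 2 * lock.length)
      · rw [if_pos hctr] at h1
        have hrN : iN - lock.length < lock.length := by omega
        have hcN : jN - lock.length < lock.length := by omega
        have er : ((iN - lock.length : Nat) : Int) = (iN : Int) - lock.length := by omega
        have ec : ((jN - lock.length : Nat) : Int) = (jN : Int) - lock.length := by omega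
        refine (hB (iN - lock.length) hrN (jN - lock.length) hcN).2 ⟨by rw [er, ec]; exact h1, ?_⟩
        rw [pvBCov_some1]
        refine ⟨⟨by rw [er]; omega, by rw [er]; omega, by rw [ec]; omega, by rw [ec]; omega⟩, ?_⟩
        rw [show ((iN - lock.length : Nat) : Int) + lock.length - x = (iN : Int) - x from by omega,
            show ((jN - lock.length : Nat) : Int) + lock.length - y = (jN : Int) - y from by omega]
        exact hK
      · rw [if_neg hctr] at h1
        omega
    · intro i hi j hj
      rw [pvU, PySem.List.mem_pyRange_one] at hi hj
      simp only [pvF, pvG]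
      by_cases hG : ((lock.length : Int) ≤ i ∧ i < 2 * lock.length
          ∧ (lock.length : Int) ≤ j ∧ j < 2 * lock.length)
          ∧ pvCell lock (i - lock.length) (j - lock.length) = 0
      · obtain ⟨hctr, hz⟩ := hG
        have hrN : (i - (lock.length : Int)).toNat < lock.length := by omega
        have hcN : (j - (lock.length : Int)).toNat < lock.length := by omega
        have er : (((i - (lock.length : Int)).toNat : Nat) : Int) = i - lock.length := by omega
        have ec : (((j - (lock.length : Int)).toNat : Nat) : Int) = j - lock.length := by omega
        have hnb := (hB _ hrN _ hcN).1
        have hcov : bCov kk lock.length kk.length x y (i - (lock.length : Int)).toNat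
            (j - (lock.length : Int)).toNat = some 1 := by
          by_contra hne
          exact hnb ⟨by rw [er, ec]; exact hz, hne⟩
        obtain ⟨hfoot, hK⟩ := (pvBCov_some1 kk lock.length kk.length x y _ _).mp hcov
        rw [er] at hfoot hK
        rw [ec] at hfoot hK
        rw [if_pos ⟨hctr, ⟨by omega, by omega, by omega, by omega⟩, hz, by
          rw [show i - (lock.length : Int) + lock.length - x = i - x from by omega,
              show j - (lock.length : Int) + lock.length - y = j - y from by omega] at hK
          exact hK⟩]
        rw [if_pos ⟨hctr, hz⟩]
      · rw [if_neg (by tauto), if_neg hG]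

theorem pvMatrix_ext (mat mat' : List (List Int)) (R C : Nat)
    (h1 : mat.length = R) (h1' : mat'.length = R)
    (h2 : ∀ r : Nat, r < R → (mat.getD r []).length = C)
    (h2' : ∀ r : Nat, r < R → (mat'.getD r []).length = C)
    (hcell : ∀ r : Nat, r < R → ∀ c : Nat, c < C →
      pvCell mat (r : Int) (c : Int) = pvCell mat' (r : Int) (c : Int)) :
    mat = mat' := by
  apply List.ext_getElem (by omega)
  intro r hr hr'
  have e1 := h2 r (by omega)
  have e2 := h2' r (by omega)
  rw [List.getD_eq_getElem _ _ hr] at e1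
  rw [List.getD_eq_getElem _ _ hr'] at e2
  apply List.ext_getElem (by omega)
  intro c hc hc'
  have := hcell r (by omega) c (by omega)
  rw [pvCell_natCast, pvCell_natCast,
    List.getD_eq_getElem _ _ hr, List.getD_eq_getElem _ _ hr',
    List.getD_eq_getElem _ _ hc, List.getD_eq_getElem _ _ hc'] at this
  exact this

theorem rotate_eq (key : List (List Int)) : rotate_key key = rotB key key.length := by
  have h0 : rotate_key key
      = (pvProd (PySem.List.pyRange 0 (key.length : Int) 1) (PySem.List.pyRange 0 (key.length : Int) 1)).foldl
          (fun ret e => pvSetCell ret e.2 ((key.length : Int) - e.1 - 1) (pvCell key e.1 e.2))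
          (List.replicate key.length (List.replicate key.length (0 : Int))) := by
    rw [rotate_key]
    exact pvFoldl_nested _ _ _ _
  have hfun : (fun (ret : List (List Int)) (e : Int × Int) =>
        pvSetCell ret e.2 ((key.length : Int) - e.1 - 1) (pvCell key e.1 e.2))
      = (fun ret e => pvSetCell ret ((fun (e : Int × Int) => e.2) e)
          ((fun (e : Int × Int) => (key.length : Int) - e.1 - 1) e)
          ((fun (r c : Int) => pvCell key ((key.length : Int) - 1 - c) r)
            ((fun (e : Int × Int) => e.2) e) ((fun (e : Int × Int) => (key.length : Int) - e.1 - 1) e))) := by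
    funext ret e
    simp only []
    rw [show (key.length : Int) - 1 - ((key.length : Int) - e.1 - 1) = e.1 from by ring]
  rw [hfun] at h0
  have hinit2 : ∀ r : Nat, r < key.length →
      (((List.replicate key.length (List.replicate key.length (0 : Int))).getD r []).length) = key.length := by
    intro r hr; rw [List.getD_eq_getElem?_getD, List.getElem?_replicate, if_pos hr]; simp
  have hrange : ∀ e ∈ pvProd (PySem.List.pyRange 0 (key.length : Int) 1) (PySem.List.pyRange 0 (key.length : Int) 1),
      0 ≤ (fun (e : Int × Int) => e.2) e ∧ (fun (e : Int × Int) => e.2) e < ((key.length : Nat) : Int)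
      ∧ 0 ≤ (fun (e : Int × Int) => (key.length : Int) - e.1 - 1) e
      ∧ (fun (e : Int × Int) => (key.length : Int) - e.1 - 1) e < ((key.length : Nat) : Int) := by
    intro e he
    obtain ⟨h1, h2⟩ := (pvMem_prod _ _ e).mp he
    rw [PySem.List.mem_pyRange_one] at h1 h2
    simp only []
    refine ⟨by omega, by omega, by omega, by omega⟩
  obtain ⟨d1, d2, d3⟩ := pv_foldl_set (fun (e : Int × Int) => e.2)
    (fun (e : Int × Int) => (key.length : Int) - e.1 - 1)
    (fun (r c : Int) => pvCell key ((key.length : Int) - 1 - c) r)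
    key.length key.length _ _ (by simp) hinit2 hrange
  rw [← h0] at d1 d2 d3
  have hrB1 : (rotB key key.length).length = key.length := by simp [rotB]
  have hrB2 : ∀ r : Nat, r < key.length → (((rotB key key.length).getD r []).length) = key.length := by
    intro r hr
    rw [rotB, List.getD_eq_getElem?_getD, List.getElem?_map, List.getElem?_range hr]
    simp
  apply pvMatrix_ext _ _ key.length key.length d1 hrB1 d2 hrB2
  intro r hr c hc
  rw [d3 r c, if_pos ?mem]
  case mem =>
    refine ⟨(((key.length - 1 - c : Nat) : Int), (r : Int)), ?_, rfl, by
      show (key.length : Int) - ((key.length - 1 - c : Nat) : Int) - 1 = (c : Int)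
      omega⟩
    rw [pvMem_prod]
    constructor <;> (rw [PySem.List.mem_pyRange_one]; omega)
  have hrow : (rotB key key.length).getD r []
      = (List.range key.length).map (fun (i : Nat) => pvCell key ((key.length : Int) - 1 - (i : Int)) (r : Int)) := by
    rw [rotB, List.getD_eq_getElem _ _ (by simpa using hr)]
    rw [List.getElem_map, List.getElem_range]
  rw [pvCell_natCast, hrow, List.getD_eq_getElem _ _ (by simpa using hc)]
  rw [List.getElem_map, List.getElem_range]

theorem pvAny_congr {α : Type} (l : List α) (f g : α → Bool) (h : ∀ a ∈ l, f a = g a) :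
    l.any f = l.any g := by
  induction l with
  | nil => rfl
  | cons a l ih =>
    simp only [List.any_cons, h a (List.mem_cons_self ..),
      ih (fun b hb => h b (List.mem_cons_of_mem _ hb))]

theorem loop_eq (key lock : List (List Int)) (hm : key.length ≤ lock.length + 1) :
    ∀ (t : Nat) (kk : List (List Int)), kk.length = key.length →
      rotLoop lock (buildBig lock).1 (buildBig lock).2 t kk
        = altLoop lock lock.length key.length t kk := by
  intro t
  induction t with
  | zero => intro kk _; rfl
  | succ t ih =>
    intro kk hlen
    rw [rotLoop, altLoop]
    have hany : (PySem.List.pyRange ((lock.length : Int) - kk.length + 1) (2 * lock.length : Int) 1).any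
          (fun i => (PySem.List.pyRange ((lock.length : Int) - kk.length + 1) (2 * lock.length : Int) 1).any
            (fun j => try_to_match_key_into_lock kk (buildBig lock).1 (buildBig lock).2 i j))
        = (PySem.List.pyRange ((lock.length : Int) - key.length + 1) (2 * lock.length : Int) 1).any
          (fun x => (PySem.List.pyRange ((lock.length : Int) - key.length + 1) (2 * lock.length : Int) 1).any
            (fun y => fitsB kk lock lock.length key.length x y)) := by
      rw [hlen]
      apply pvAny_congr
      intro x hx
      rw [PySem.List.mem_pyRange_one] at hx
      apply pvAny_congr
      intro y hy
      rw [PySem.List.mem_pyRange_one] at hy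
      have := match_iff_fits kk lock x y (by omega)
        (by omega) (by omega) (by omega) (by omega)
      rw [this, hlen]
    rw [hany]
    by_cases hcond : (PySem.List.pyRange ((lock.length : Int) - key.length + 1) (2 * lock.length : Int) 1).any
        (fun x => (PySem.List.pyRange ((lock.length : Int) - key.length + 1) (2 * lock.length : Int) 1).any
          (fun y => fitsB kk lock lock.length key.length x y)) = true
    · rw [if_pos hcond, if_pos hcond]
    · rw [if_neg hcond, if_neg hcond]
      rw [rotate_eq kk, hlen]
      exact ih (rotB kk key.length) (by simp [rotB])

-- ===== VERDICT (by name: the statement is the Claim_ definition above) =====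
theorem solution_spec : Claim_equal_solution := by
  intro key lock _ hpre
  unfold Spec_solution
  obtain ⟨-, -, hm⟩ := hpre
  exact loop_eq key lock hm 4 key rfl
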